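-- pv_equiv track=rewrite | github.com/EsadSimitcioglu/InferenceAttackSmartGrid | hidden_markov_model/hmm_models.py | analyze_taken_path
-- ===== SOURCE A (Python) =====
-- def analyze_taken_path(users_grid_value_list):
--     path_dict = {}
--     for user_value in users_grid_value_list:
--         for value_index, value in enumerate(user_value):
--             if value_index == 0:
--                 continue
--
--             prev_grid = user_value[value_index - 1]
--
--             if prev_grid in path_dict:
--                 value_dict = path_dict.get(prev_grid)
--
--                 if value in value_dict:
--                     value_dict[value] += 1
--                 else:
--                     value_dict[value] = 1
--
--             else:
--                 value_dict = {value: 1}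
--                 path_dict[prev_grid] = value_dict
--
--     return path_dict
-- ===== SOURCE B (Python) =====
-- def analyze_taken_path(users_grid_value_list):
--     # Pass 1: group — record, per source grid, the list of successor grids
--     # (no counting happens here, just appending).
--     rows = {}
--     for user_value in users_grid_value_list:
--         for prev, curr in zip(user_value, user_value[1:]):
--             rows.setdefault(prev, []).append(curr)
--     # Pass 2: count each row declaratively by scanning it.
--     return {prev: {c: row.count(c) for c in dict.fromkeys(row)}
--             for prev, row in rows.items()}
-- ===== Notes on version B (the rewrite author's own statement) =====
-- stated objective: alternative
-- what changed: A counts incrementally in one interleaved pass, branching on nested-dict membership and bumping counters per transition; B never maintains a counter: pass 1 only groups, appending each successor to a per-source list, and pass 2 builds the result declaratively, counting each row by scanning it with list.count over its deduplicated elements.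
import Mathlib
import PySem

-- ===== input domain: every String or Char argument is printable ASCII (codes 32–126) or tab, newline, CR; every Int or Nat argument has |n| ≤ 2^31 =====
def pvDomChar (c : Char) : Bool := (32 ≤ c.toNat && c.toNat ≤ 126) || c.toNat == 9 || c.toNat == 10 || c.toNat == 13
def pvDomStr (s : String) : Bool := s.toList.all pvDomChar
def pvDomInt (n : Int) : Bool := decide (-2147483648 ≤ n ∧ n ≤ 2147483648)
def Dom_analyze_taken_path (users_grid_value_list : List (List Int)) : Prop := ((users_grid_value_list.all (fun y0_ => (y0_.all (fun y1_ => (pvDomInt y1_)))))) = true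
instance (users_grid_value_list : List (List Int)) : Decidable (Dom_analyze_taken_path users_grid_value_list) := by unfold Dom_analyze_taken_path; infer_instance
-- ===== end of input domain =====

-- B replaces A's incremental interleaved counting by group-then-count: pass 1 only appends each successor to a per-source list, pass 2 counts each row declaratively with list.count over its deduplicated elements (objective: alternative decomposition).

-- ===== PORT A =====
def analyze_taken_path (users_grid_value_list : List (List Int)) : List (Int × List (Int × Int)) :=
  let path_dict : PySem.Dict Int (PySem.Dict Int Int) :=
    users_grid_value_list.foldl (fun path_dict user_value =>
      (PySem.List.enumerate user_value).foldl (fun path_dict iv =>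
        if iv.1 = 0 then path_dict
        else
          -- user_value[value_index - 1]: the index is in range (1 ≤ value_index < len), so the .getD default is never used
          let prev_grid : Int := (PySem.List.pyGet? user_value (iv.1 - 1)).getD 0
          if path_dict.contains prev_grid then
            -- value_dict = path_dict.get(prev_grid): the key is present, so the .getD default is never used
            let value_dict := path_dict.getD prev_grid PySem.Dict.empty
            if value_dict.contains iv.2 then
              path_dict.insert prev_grid (value_dict.insert iv.2 (value_dict.getD iv.2 0 + 1))
            else
              path_dict.insert prev_grid (value_dict.insert iv.2 1)
          else
            path_dict.insert prev_grid (PySem.Dict.empty.insert iv.2 1)) path_dict)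
      PySem.Dict.empty
  path_dict.items.map (fun kv => (kv.1, kv.2.items))

-- ===== PORT B =====
def analyze_taken_path_alt (users_grid_value_list : List (List Int)) : List (Int × List (Int × Int)) :=
  -- Pass 1: rows.setdefault(prev, []).append(curr) over zip(user_value, user_value[1:])
  let rows : PySem.Dict Int (List Int) :=
    users_grid_value_list.foldl (fun rows user_value =>
      (user_value.zip (PySem.List.slice user_value (some 1) none)).foldl (fun rows pc =>
        rows.modify pc.1 [] (fun row => row ++ [pc.2])) rows)
      PySem.Dict.empty
  -- Pass 2: {prev: {c: row.count(c) for c in dict.fromkeys(row)} for prev, row in rows.items()}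
  rows.items.map (fun pr =>
    (pr.1, ((PySem.List.dedup pr.2).foldl
      (fun d c => d.insert c (List.count c pr.2 : Int)) PySem.Dict.empty).items))

-- ===== PRECONDITION & SPEC =====
def Spec_analyze_taken_path (users_grid_value_list : List (List Int)) (out : List (Int × List (Int × Int))) : Prop := out = analyze_taken_path_alt users_grid_value_list
instance (users_grid_value_list : List (List Int)) (out : List (Int × List (Int × Int))) : Decidable (Spec_analyze_taken_path users_grid_value_list out) := by unfold Spec_analyze_taken_path; infer_instance

-- ===== CLAIM (what is proved, stated in full; the proofs are below) =====
def Claim_equal_analyze_taken_path : Prop := ∀ (users_grid_value_list : List (List Int)), Dom_analyze_taken_path users_grid_value_list → Spec_analyze_taken_path users_grid_value_list (analyze_taken_path users_grid_value_list)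

-- ===== LEMMAS AND PROOFS =====

-- abbreviations used only by the proofs
def pvStepN (d : PySem.Dict Int (PySem.Dict Int Int)) (pc : Int × Int) : PySem.Dict Int (PySem.Dict Int Int) :=
  d.modify pc.1 PySem.Dict.empty (fun vd => vd.insert pc.2 (vd.getD pc.2 0 + 1))

def pvTransitions (xss : List (List Int)) : List (Int × Int) :=
  xss.flatMap (fun uv => uv.zip uv.tail)

-- A's literal branch structure is a single dict "modify"
theorem pvStepA_eq (d : PySem.Dict Int (PySem.Dict Int Int)) (p c : Int) :
    (if d.contains p then
       let vd := d.getD p PySem.Dict.empty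
       if vd.contains c then d.insert p (vd.insert c (vd.getD c 0 + 1))
       else d.insert p (vd.insert c 1)
     else d.insert p (PySem.Dict.empty.insert c 1))
    = pvStepN d (p, c) := by
  simp only [pvStepN, PySem.Dict.modify]
  by_cases hp : d.contains p = true
  · simp only [hp, if_true]
    by_cases hc : (d.getD p PySem.Dict.empty).contains c = true
    · simp [hc]
    · simp [hc, PySem.Dict.getD_of_not_contains _ _ (by simpa using hc)]
  · simp [hp, PySem.Dict.getD_of_not_contains d PySem.Dict.empty (by simpa using hp),
      PySem.Dict.getD_empty]

-- the enumerate-with-index-lookup loop is the adjacent-pairs loop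
theorem pvEnumAdj {δ : Type} (G : δ → Int × Int → δ) (full : List Int) :
    ∀ (suf : List Int) (k : Nat), List.drop k full = suf → 1 ≤ k → ∀ (d : δ),
      (PySem.List.enumerate suf (k : Int)).foldl
        (fun d iv => if iv.1 = 0 then d
          else G d ((PySem.List.pyGet? full (iv.1 - 1)).getD 0, iv.2)) d
      = ((List.drop (k-1) full).zip suf).foldl G d := by
  intro suf
  induction suf with
  | nil => intro k _ _ d; simp [PySem.List.enumerate_nil]
  | cons v suf ih =>
    intro k hdrop hk d
    have hklt : k < full.length := by
      by_contra hge
      rw [List.drop_eq_nil_of_le (by omega)] at hdrop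
      exact List.cons_ne_nil _ _ hdrop.symm
    have hdrop' : List.drop (k+1) full = suf := by
      have := congrArg List.tail hdrop
      rwa [← List.drop_one, List.drop_drop] at this
    have hget : full[k] = v := by
      have := List.drop_eq_getElem_cons hklt
      rw [hdrop] at this
      exact (List.cons_eq_cons.mp this.symm).1
    rw [PySem.List.enumerate_cons, List.foldl_cons]
    have hk0 : ¬ ((k : Int) = 0) := by omega
    simp only [hk0, if_false]
    have hcast : (k : Int) + 1 = ((k+1 : Nat) : Int) := by push_cast; ring
    have hidx : (k : Int) - 1 = ((k-1 : Nat) : Int) := by omega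
    have hkm : k - 1 < full.length := by omega
    have hgetprev : (PySem.List.pyGet? full ((k : Int) - 1)).getD 0 = full[k-1] := by
      rw [hidx, PySem.List.pyGet?_natCast, List.getElem?_eq_getElem hkm]
      rfl
    have hdropkm : List.drop (k-1) full = full[k-1] :: List.drop k full := by
      have h1 : List.drop (k-1) full = full[k-1] :: List.drop (k-1+1) full :=
        List.drop_eq_getElem_cons hkm
      rwa [show k - 1 + 1 = k by omega] at h1
    rw [hgetprev, hcast, ih (k+1) hdrop' (by omega) (G d (full[k-1], v))]
    rw [hdropkm, hdrop, List.zip_cons_cons, List.foldl_cons]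
    rw [show k + 1 - 1 = k by omega, hdrop]

theorem pvInnerA {δ : Type} (G : δ → Int × Int → δ) (uv : List Int) (d : δ) :
    (PySem.List.enumerate uv).foldl
      (fun d iv => if iv.1 = 0 then d
        else G d ((PySem.List.pyGet? uv (iv.1 - 1)).getD 0, iv.2)) d
    = (uv.zip uv.tail).foldl G d := by
  cases uv with
  | nil => simp [PySem.List.enumerate_nil]
  | cons a t =>
    rw [show PySem.List.enumerate (a :: t) = PySem.List.enumerate (a :: t) 0 from rfl,
      PySem.List.enumerate_cons, List.foldl_cons]
    have h := pvEnumAdj G (a :: t) t 1 (by simp) (by omega) d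
    norm_num at h ⊢
    rw [h]

theorem pvFoldlFlat {δ β γ : Type} (g : δ → γ → δ) (h : β → List γ) :
    ∀ (xss : List β) (d : δ),
      xss.foldl (fun d uv => (h uv).foldl g d) d = (xss.flatMap h).foldl g d := by
  intro xss
  induction xss with
  | nil => intro d; rfl
  | cons uv xss ih => intro d; simp only [List.foldl_cons, List.flatMap_cons, List.foldl_append, ih]

-- inner-dict characterisation of A's nested fold
theorem pvGetD_A (ps : List (Int × Int)) :
    ∀ (d : PySem.Dict Int (PySem.Dict Int Int)) (p : Int),
      (ps.foldl pvStepN d).getD p PySem.Dict.empty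
      = ((ps.filter (fun q => q.1 == p)).map Prod.snd).foldl
          (fun vd c => vd.insert c (vd.getD c 0 + 1)) (d.getD p PySem.Dict.empty) := by
  induction ps with
  | nil => intro d p; rfl
  | cons pc ps ih =>
    intro d p
    rw [List.foldl_cons, ih, List.filter_cons]
    by_cases hp : pc.1 = p
    · have hd : (pvStepN d pc).getD p PySem.Dict.empty
          = (d.getD p PySem.Dict.empty).insert pc.2 ((d.getD p PySem.Dict.empty).getD pc.2 0 + 1) := by
        rw [pvStepN, ← hp]
        exact PySem.Dict.getD_modify_self d pc.1 PySem.Dict.empty _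
      simp [hp, hd]
    · have hd : (pvStepN d pc).getD p PySem.Dict.empty = d.getD p PySem.Dict.empty :=
        PySem.Dict.getD_modify_of_ne d PySem.Dict.empty _ (fun h => hp h.symm)
      simp [hd, show (pc.1 == p) = false from beq_eq_false_iff_ne.mpr hp]

-- a fold of inserts whose value depends only on the key: untouched keys keep their value
theorem pvFoldlInsertGetD_not {ν : Type} (g : Int → ν) :
    ∀ (L : List Int) (d : PySem.Dict Int ν) (c : Int) (d0 : ν), c ∉ L →
      (L.foldl (fun d x => d.insert x (g x)) d).getD c d0 = d.getD c d0 := by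
  intro L
  induction L with
  | nil => intro d c d0 _; rfl
  | cons x L ih =>
    intro d c d0 hc
    have hne : c ≠ x := fun h => hc (h ▸ List.mem_cons_self)
    rw [List.foldl_cons, ih _ _ _ (fun h => hc (List.mem_cons_of_mem _ h)),
      PySem.Dict.getD_insert_of_ne _ _ _ hne]

-- ... and inserted keys carry exactly their value
theorem pvFoldlInsertGetD_mem {ν : Type} (g : Int → ν) :
    ∀ (L : List Int) (d : PySem.Dict Int ν) (c : Int) (d0 : ν), c ∈ L →
      (L.foldl (fun d x => d.insert x (g x)) d).getD c d0 = g c := by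
  intro L
  induction L with
  | nil => intro d c d0 h; cases h
  | cons x L ih =>
    intro d c d0 hc
    rw [List.foldl_cons]
    by_cases hmem : c ∈ L
    · exact ih _ c d0 hmem
    · have hcx : c = x := by
        rcases List.mem_cons.mp hc with h | h
        · exact h
        · exact absurd h hmem
      rw [pvFoldlInsertGetD_not g L _ c d0 hmem, hcx, PySem.Dict.getD_insert_self]

-- items of A's inner counting fold
theorem pvInnerItemsA (cs : List Int) :
    ((cs.foldl (fun vd c => vd.insert c (vd.getD c 0 + 1)) (PySem.Dict.empty : PySem.Dict Int Int))).items
    = (PySem.Set.ofList cs).map (fun c => (c, (List.count c cs : Int))) := by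
  set D := cs.foldl (fun vd c => vd.insert c (vd.getD c 0 + 1)) (PySem.Dict.empty : PySem.Dict Int Int) with hD
  have hkeys : D.keys = PySem.Set.ofList cs := by
    have h := PySem.Dict.keys_foldl_insert cs (fun d x => d.getD x 0 + 1) (PySem.Dict.empty : PySem.Dict Int Int)
    rw [PySem.Dict.keys_empty, PySem.Set.update_nil_left] at h
    exact h
  rw [PySem.Dict.items_eq_map_keys D (by rw [hkeys]; exact PySem.Set.nodup_ofList cs) 0, hkeys]
  apply List.map_congr_left
  intro c _
  have h := PySem.Dict.getD_foldl_insert_add_one cs (PySem.Dict.empty : PySem.Dict Int Int) c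
  rw [PySem.Dict.getD_empty, zero_add] at h
  rw [show D.getD c 0 = (List.count c cs : Int) from h]

-- B's grouping step: rows.setdefault(prev, []).append(curr)
def pvRowStep (rows : PySem.Dict Int (List Int)) (pc : Int × Int) : PySem.Dict Int (List Int) :=
  rows.modify pc.1 [] (fun row => row ++ [pc.2])

-- row characterisation of B's grouping fold
theorem pvGetD_R (ps : List (Int × Int)) :
    ∀ (d : PySem.Dict Int (List Int)) (p : Int),
      (ps.foldl pvRowStep d).getD p []
      = d.getD p [] ++ (ps.filter (fun q => q.1 == p)).map Prod.snd := by
  induction ps with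
  | nil => intro d p; simp
  | cons pc ps ih =>
    intro d p
    rw [List.foldl_cons, ih, List.filter_cons]
    by_cases hp : pc.1 = p
    · have hd : (pvRowStep d pc).getD p [] = d.getD p [] ++ [pc.2] := by
        rw [pvRowStep, ← hp]
        exact PySem.Dict.getD_modify_self d pc.1 [] _
      simp [hp, hd]
    · have hd : (pvRowStep d pc).getD p [] = d.getD p [] :=
        PySem.Dict.getD_modify_of_ne d [] _ (fun h => hp h.symm)
      simp [hd, show (pc.1 == p) = false from beq_eq_false_iff_ne.mpr hp]

-- items of B's declarative row-counting fold
theorem pvInnerItemsB (cs : List Int) :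
    (((PySem.List.dedup cs).foldl (fun d c => d.insert c (List.count c cs : Int))
        (PySem.Dict.empty : PySem.Dict Int Int))).items
    = (PySem.Set.ofList cs).map (fun c => (c, (List.count c cs : Int))) := by
  rw [PySem.List.dedup_eq_ofList]
  set D := (PySem.Set.ofList cs).foldl (fun d c => d.insert c (List.count c cs : Int))
    (PySem.Dict.empty : PySem.Dict Int Int) with hD
  have hkeys : D.keys = PySem.Set.ofList cs := by
    have h := PySem.Dict.keys_foldl_insert (PySem.Set.ofList cs)
      (fun _ x => (List.count x cs : Int)) (PySem.Dict.empty : PySem.Dict Int Int)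
    rw [PySem.Dict.keys_empty, PySem.Set.update_nil_left, PySem.Set.ofList_ofList] at h
    exact h
  rw [PySem.Dict.items_eq_map_keys D (by rw [hkeys]; exact PySem.Set.nodup_ofList cs) 0, hkeys]
  apply List.map_congr_left
  intro c hc
  have h := pvFoldlInsertGetD_mem (fun x => (List.count x cs : Int)) (PySem.Set.ofList cs)
    PySem.Dict.empty c 0 hc
  rw [show D.getD c 0 = (List.count c cs : Int) from h]

theorem pvSliceOne (xs : List Int) : PySem.List.slice xs (some 1) none = xs.tail := by
  rw [PySem.List.slice_from xs (by norm_num : (0:Int) ≤ 1)]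
  norm_num [List.drop_one]

theorem pvMain (xss : List (List Int)) :
    analyze_taken_path xss = analyze_taken_path_alt xss := by
  -- A's enumerate-and-index inner loop is the adjacent-pairs loop over pvStepN
  have hA : ∀ (uv : List Int) (pd : PySem.Dict Int (PySem.Dict Int Int)),
      (PySem.List.enumerate uv).foldl (fun path_dict iv =>
        if iv.1 = 0 then path_dict
        else
          let prev_grid : Int := (PySem.List.pyGet? uv (iv.1 - 1)).getD 0
          if path_dict.contains prev_grid then
            let value_dict := path_dict.getD prev_grid PySem.Dict.empty
            if value_dict.contains iv.2 then
              path_dict.insert prev_grid (value_dict.insert iv.2 (value_dict.getD iv.2 0 + 1))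
            else
              path_dict.insert prev_grid (value_dict.insert iv.2 1)
          else
            path_dict.insert prev_grid (PySem.Dict.empty.insert iv.2 1)) pd
      = (uv.zip uv.tail).foldl pvStepN pd := by
    intro uv pd
    have hfun : (fun (path_dict : PySem.Dict Int (PySem.Dict Int Int)) (iv : Int × Int) =>
        if iv.1 = 0 then path_dict
        else
          let prev_grid : Int := (PySem.List.pyGet? uv (iv.1 - 1)).getD 0
          if path_dict.contains prev_grid then
            let value_dict := path_dict.getD prev_grid PySem.Dict.empty
            if value_dict.contains iv.2 then
              path_dict.insert prev_grid (value_dict.insert iv.2 (value_dict.getD iv.2 0 + 1))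
            else
              path_dict.insert prev_grid (value_dict.insert iv.2 1)
          else
            path_dict.insert prev_grid (PySem.Dict.empty.insert iv.2 1))
        = (fun d iv => if iv.1 = 0 then d
            else pvStepN d ((PySem.List.pyGet? uv (iv.1 - 1)).getD 0, iv.2)) := by
      funext d iv
      by_cases h0 : iv.1 = 0
      · simp [h0]
      · simp only [h0, if_false]
        exact pvStepA_eq d _ iv.2
    rw [hfun]
    exact pvInnerA pvStepN uv pd
  set ts := pvTransitions xss with hts
  -- A as a single fold over the flattened transitions
  have hAd : analyze_taken_path xss
      = ((ts.foldl pvStepN PySem.Dict.empty).items.map (fun kv => (kv.1, kv.2.items))) := by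
    unfold analyze_taken_path
    simp only [hA]
    rw [pvFoldlFlat pvStepN (fun uv => uv.zip uv.tail) xss PySem.Dict.empty]
    rfl
  -- A's outer key list
  have hKA : (ts.foldl pvStepN PySem.Dict.empty).keys = PySem.Set.ofList (ts.map Prod.fst) := by
    have h := PySem.Dict.keys_foldl_modify_key ts Prod.fst (PySem.Dict.empty : PySem.Dict Int Int)
      (fun _ pc => fun vd => vd.insert pc.2 (vd.getD pc.2 0 + 1)) PySem.Dict.empty
    rw [PySem.Dict.keys_empty, PySem.Set.update_nil_left] at h
    unfold pvStepN
    exact h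
  -- B's grouping fold, flattened over the same transition list
  have hB : ∀ (uv : List Int) (rows : PySem.Dict Int (List Int)),
      (uv.zip (PySem.List.slice uv (some 1) none)).foldl
        (fun rows pc => rows.modify pc.1 [] (fun row => row ++ [pc.2])) rows
      = (uv.zip uv.tail).foldl pvRowStep rows := by
    intro uv rows
    rw [pvSliceOne]
    rfl
  have hBd : analyze_taken_path_alt xss
      = (ts.foldl pvRowStep PySem.Dict.empty).items.map (fun pr =>
          (pr.1, ((PySem.List.dedup pr.2).foldl
            (fun d c => d.insert c (List.count c pr.2 : Int)) PySem.Dict.empty).items)) := by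
    unfold analyze_taken_path_alt
    simp only [hB]
    rw [pvFoldlFlat pvRowStep (fun uv => uv.zip uv.tail) xss PySem.Dict.empty]
    rfl
  -- B's outer key list
  have hKB : (ts.foldl pvRowStep PySem.Dict.empty).keys = PySem.Set.ofList (ts.map Prod.fst) := by
    have h := PySem.Dict.keys_foldl_modify_key ts Prod.fst ([] : List Int)
      (fun _ pc => fun row => row ++ [pc.2]) PySem.Dict.empty
    rw [PySem.Dict.keys_empty, PySem.Set.update_nil_left] at h
    unfold pvRowStep
    exact h
  rw [hAd, hBd,
    PySem.Dict.items_eq_map_keys _ (by rw [hKA]; exact PySem.Set.nodup_ofList _) PySem.Dict.empty,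
    PySem.Dict.items_eq_map_keys _ (by rw [hKB]; exact PySem.Set.nodup_ofList _) ([] : List Int),
    hKA, hKB, List.map_map, List.map_map]
  apply List.map_congr_left
  intro p _
  simp only [Function.comp_apply]
  have hia := pvGetD_A ts PySem.Dict.empty p
  rw [PySem.Dict.getD_empty] at hia
  have hib := pvGetD_R ts PySem.Dict.empty p
  rw [PySem.Dict.getD_empty, List.nil_append] at hib
  rw [hia, hib, pvInnerItemsA, pvInnerItemsB]

-- ===== VERDICT (by name: the statement is the Claim_ definition above) =====
theorem analyze_taken_path_spec : Claim_equal_analyze_taken_path := by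
  intro xss _
  unfold Spec_analyze_taken_path
  exact pvMain xss
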